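-- pv_equiv track=rewrite | github.com/YungEnHsieh/WebCrawler | containers/scheduler_ingest/ingestor/db_ops.py | _split_unique_urls
-- ===== SOURCE A (Python) =====
-- def _split_unique_urls(items: list[tuple[int, dict]]) -> list[list[tuple[int, dict]]]:
--     """Split into sub-batches with unique URLs; ON CONFLICT DO UPDATE
--     refuses to touch the same row twice in one statement."""
--     seen: set[str] = set()
--     for _, rec in items:
--         url = rec["url"]
--         if url in seen:
--             break
--         seen.add(url)
--     else:
--         return [items]
--
--     sub_batches: list[list[tuple[int, dict]]] = []
--     current: list[tuple[int, dict]] = []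
--     seen = set()
--     for idx, rec in items:
--         url = rec["url"]
--         if url in seen:
--             sub_batches.append(current)
--             current = [(idx, rec)]
--             seen = {url}
--         else:
--             current.append((idx, rec))
--             seen.add(url)
--     if current:
--         sub_batches.append(current)
--     return sub_batches
-- ===== SOURCE B (Python) =====
-- def _split_unique_urls(items: list[tuple[int, dict]]) -> list[list[tuple[int, dict]]]:
--     """Split into sub-batches with unique URLs (greedy chunking:
--     repeatedly take the longest prefix whose URLs are all distinct)."""
--     batches: list[list[tuple[int, dict]]] = []
--     rest = items
--     while True:
--         seen: set[str] = set()
--         i = 0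
--         while i < len(rest) and rest[i][1]["url"] not in seen:
--             seen.add(rest[i][1]["url"])
--             i += 1
--         batches.append(rest[:i])
--         rest = rest[i:]
--         if not rest:
--             return batches
-- ===== Notes on version B (the rewrite author's own statement) =====
-- stated objective: alternative
-- what changed: Replaces A's two-phase structure (a fast-path duplicate probe plus a three-accumulator batching loop) by a single greedy chunking loop that repeatedly slices off the longest prefix with pairwise-distinct URLs.
-- outside the precondition, e.g. on _split_unique_urls([(1, {})]): A raises KeyError, B raises KeyError
import Mathlib
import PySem

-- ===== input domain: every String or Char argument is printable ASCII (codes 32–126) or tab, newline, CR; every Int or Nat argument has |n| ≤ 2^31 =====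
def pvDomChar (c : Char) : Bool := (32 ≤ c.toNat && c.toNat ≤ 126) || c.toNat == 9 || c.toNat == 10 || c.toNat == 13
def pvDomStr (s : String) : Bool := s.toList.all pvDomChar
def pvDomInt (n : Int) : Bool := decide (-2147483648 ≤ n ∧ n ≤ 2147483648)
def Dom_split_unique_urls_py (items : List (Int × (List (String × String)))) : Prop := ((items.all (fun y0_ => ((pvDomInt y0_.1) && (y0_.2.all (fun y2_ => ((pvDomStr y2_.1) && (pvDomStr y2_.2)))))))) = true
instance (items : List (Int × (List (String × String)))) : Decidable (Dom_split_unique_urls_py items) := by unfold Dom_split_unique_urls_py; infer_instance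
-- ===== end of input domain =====

-- B replaces A's two-phase pass (duplicate probe + accumulator loop) by greedy chunking:
-- repeatedly take the longest unique-URL prefix; same return value, alternative decomposition.

-- ===== PORT A =====
-- rec["url"]: first-match lookup; Pre_ guarantees the key is present, so getD "" is exact there.
def pvUrl (rec : List (String × String)) : String :=
  PySem.Dict.getD (PySem.Dict.mk rec) "url" ""

-- first loop of A: returns true iff the loop breaks (a duplicate url in a prefix)
def pvFirstLoopA (seen : PySem.Set String) : List (Int × (List (String × String))) → Bool
  | [] => false
  | (_, rec) :: xs =>
      let url := pvUrl rec
      if PySem.Set.contains seen url then true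
      else pvFirstLoopA (PySem.Set.add seen url) xs

-- second loop of A: state (sub_batches, current, seen)
def pvLoopA : List (Int × (List (String × String))) →
    List (List (Int × (List (String × String)))) →
    List (Int × (List (String × String))) → PySem.Set String →
    List (List (Int × (List (String × String))))
  | [], subs, cur, _ => if cur ≠ [] then subs ++ [cur] else subs
  | (idx, rec) :: xs, subs, cur, seen =>
      let url := pvUrl rec
      if PySem.Set.contains seen url then
        pvLoopA xs (subs ++ [cur]) [(idx, rec)] (PySem.Set.ofList [url])
      else
        pvLoopA xs subs (cur ++ [(idx, rec)]) (PySem.Set.add seen url)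

def split_unique_urls_py (items : List (Int × (List (String × String)))) : List (List (Int × (List (String × String)))) :=
  if pvFirstLoopA PySem.Set.empty items = false then [items]
  else pvLoopA items [] [] PySem.Set.empty

-- ===== PORT B =====
-- inner while of Source B: index i of the first url already seen (length if none)
def pvScanB (seen : PySem.Set String) : List (Int × (List (String × String))) → Nat
  | [] => 0
  | (_, rec) :: xs =>
      if PySem.Set.contains seen (pvUrl rec) then 0
      else 1 + pvScanB (PySem.Set.add seen (pvUrl rec)) xs

theorem pvContains_true (s : PySem.Set String) (u : String) :
    (PySem.Set.contains s u = true) = (u ∈ s) := by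
  simp [PySem.Set.contains_eq_listContains]

theorem pvScanB_cons_lt (x : Int × (List (String × String))) (xs : List (Int × (List (String × String)))) :
    0 < pvScanB PySem.Set.empty (x :: xs) := by
  obtain ⟨i, rec⟩ := x
  simp only [pvScanB, pvContains_true]
  rw [if_neg (by simp [PySem.Set.empty])]
  omega

-- outer while of Source B
def pvChunksB (acc : List (List (Int × (List (String × String)))))
    (rest : List (Int × (List (String × String)))) :
    List (List (Int × (List (String × String)))) :=
  let i := pvScanB PySem.Set.empty rest
  let acc' := acc ++ [rest.take i]
  let rest' := rest.drop i
  if h : rest' = [] then acc' else pvChunksB acc' rest'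
termination_by rest.length
decreasing_by
  cases rest with
  | nil => exact absurd rfl h
  | cons x xs =>
      have := pvScanB_cons_lt x xs
      simp only [List.length_drop, List.length_cons]
      omega

def split_unique_urls_py_alt (items : List (Int × (List (String × String)))) : List (List (Int × (List (String × String)))) :=
  pvChunksB [] items

-- ===== PRECONDITION & SPEC =====
-- Pre_ excludes exactly the inputs where some record lacks the "url" key, on which the Python A raises KeyError.
def Pre_split_unique_urls_py (items : List (Int × (List (String × String)))) : Prop :=
  (items.all (fun p => PySem.Dict.contains (PySem.Dict.mk p.2) "url")) = true
instance (items : List (Int × (List (String × String)))) : Decidable (Pre_split_unique_urls_py items) := by unfold Pre_split_unique_urls_py; infer_instance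

def pvWitness_split_unique_urls_py : (List (Int × (List (String × String)))) :=
  [(1, [("url", "a")]), (2, [("url", "a")]), (3, [("url", "b")])]

def Spec_split_unique_urls_py (items : List (Int × (List (String × String)))) (out : List (List (Int × (List (String × String))))) : Prop := out = split_unique_urls_py_alt items
instance (items : List (Int × (List (String × String)))) (out : List (List (Int × (List (String × String))))) : Decidable (Spec_split_unique_urls_py items out) := by unfold Spec_split_unique_urls_py; infer_instance

-- ===== CLAIM (what is proved, stated in full; the proofs are below) =====
def Claim_equal_split_unique_urls_py : Prop := ∀ (items : List (Int × (List (String × String)))), Dom_split_unique_urls_py items → Pre_split_unique_urls_py items → Spec_split_unique_urls_py items (split_unique_urls_py items)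

-- ===== LEMMAS AND PROOFS =====

theorem pvOfList_sing (u : String) :
    PySem.Set.ofList [u] = PySem.Set.add PySem.Set.empty u := rfl

-- proof-side intermediate: A's second loop without the accumulated sub_batches
def pvGchunks (cur : List (Int × (List (String × String)))) (seen : PySem.Set String) :
    List (Int × (List (String × String))) → List (List (Int × (List (String × String))))
  | [] => [cur]
  | (idx, rec) :: xs =>
      let url := pvUrl rec
      if PySem.Set.contains seen url then
        cur :: pvGchunks [(idx, rec)] (PySem.Set.ofList [url]) xs
      else
        pvGchunks (cur ++ [(idx, rec)]) (PySem.Set.add seen url) xs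

theorem pvLoopA_eq_gchunks (xs : List (Int × (List (String × String))))
    (subs : List (List (Int × (List (String × String)))))
    (cur : List (Int × (List (String × String)))) (seen : PySem.Set String)
    (hcur : cur ≠ []) :
    pvLoopA xs subs cur seen = subs ++ pvGchunks cur seen xs := by
  induction xs generalizing subs cur seen with
  | nil => simp [pvLoopA, pvGchunks, hcur]
  | cons x xs ih =>
      obtain ⟨idx, rec⟩ := x
      simp only [pvLoopA, pvGchunks, pvContains_true]
      by_cases h : pvUrl rec ∈ seen
      · rw [if_pos h, if_pos h, ih _ _ _ (by simp)]
        simp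
      · rw [if_neg h, if_neg h, ih _ _ _ (by simp)]

theorem pvChunksB_acc (n : Nat) (rest : List (Int × (List (String × String))))
    (hn : rest.length = n)
    (acc : List (List (Int × (List (String × String))))) :
    pvChunksB acc rest = acc ++ pvChunksB [] rest := by
  induction n using Nat.strong_induction_on generalizing rest acc with
  | _ n ih =>
      conv_lhs => rw [pvChunksB]
      conv_rhs => rw [pvChunksB]
      simp only [List.nil_append]
      split_ifs with h
      · simp
      · have hlt : (rest.drop (pvScanB PySem.Set.empty rest)).length < n := by
          cases rest with
          | nil => exact absurd rfl h
          | cons x xs =>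
              have h1 := pvScanB_cons_lt x xs
              have h2 : (x :: xs).length = n := hn
              simp only [List.length_drop]
              simp only [List.length_cons] at h2
              omega
        rw [ih _ hlt _ rfl (acc ++ [rest.take (pvScanB PySem.Set.empty rest)]),
            ih _ hlt _ rfl ([rest.take (pvScanB PySem.Set.empty rest)])]
        simp

theorem pvGchunks_eq (xs : List (Int × (List (String × String))))
    (seen : PySem.Set String) (cur : List (Int × (List (String × String)))) :
    pvGchunks cur seen xs =
      (cur ++ xs.take (pvScanB seen xs)) ::
        (if xs.drop (pvScanB seen xs) = [] then []
         else pvChunksB [] (xs.drop (pvScanB seen xs))) := by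
  induction xs generalizing seen cur with
  | nil => simp [pvGchunks, pvScanB]
  | cons x xs ih =>
      obtain ⟨idx, rec⟩ := x
      have h0 : pvUrl rec ∉ (PySem.Set.empty : PySem.Set String) := by
        simp [PySem.Set.empty]
      by_cases h : pvUrl rec ∈ seen
      · simp only [pvGchunks, pvScanB, pvContains_true]
        rw [if_pos h, if_pos h]
        simp only [List.take_zero, List.drop_zero, List.append_nil]
        rw [if_neg (by simp)]
        congr 1
        rw [ih, pvOfList_sing]
        conv_rhs => rw [pvChunksB]
        simp only [pvScanB, pvContains_true, List.nil_append]
        rw [if_neg h0]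
        have hcomm : 1 + pvScanB (PySem.Set.add PySem.Set.empty (pvUrl rec)) xs =
            pvScanB (PySem.Set.add PySem.Set.empty (pvUrl rec)) xs + 1 :=
          Nat.add_comm _ _
        rw [hcomm]
        simp only [List.take_succ_cons, List.drop_succ_cons]
        split_ifs with h2
        · simp
        · rw [pvChunksB_acc _ _ rfl
            ([(idx, rec) :: List.take (pvScanB (PySem.Set.add PySem.Set.empty (pvUrl rec)) xs) xs])]
          simp only [List.cons_append, List.nil_append]
      · simp only [pvGchunks, pvScanB, pvContains_true]
        rw [if_neg h, if_neg h, ih]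
        have hcomm : 1 + pvScanB (PySem.Set.add seen (pvUrl rec)) xs =
            pvScanB (PySem.Set.add seen (pvUrl rec)) xs + 1 := Nat.add_comm _ _
        rw [hcomm]
        simp only [List.take_succ_cons, List.drop_succ_cons]
        simp

theorem pvFirstLoopA_scan (xs : List (Int × (List (String × String)))) (seen : PySem.Set String)
    (h : pvFirstLoopA seen xs = false) : pvScanB seen xs = xs.length := by
  induction xs generalizing seen with
  | nil => simp [pvScanB]
  | cons x xs ih =>
      obtain ⟨idx, rec⟩ := x
      by_cases hc : pvUrl rec ∈ seen
      · simp [pvFirstLoopA, hc] at h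
      · simp only [pvFirstLoopA, pvContains_true] at h
        rw [if_neg hc] at h
        simp only [pvScanB, pvContains_true, List.length_cons]
        rw [if_neg hc, ih _ h]
        omega

-- ===== VERDICT (by name: the statement is the Claim_ definition above) =====
theorem split_unique_urls_py_spec : Claim_equal_split_unique_urls_py := by
  intro items _ _
  unfold Spec_split_unique_urls_py split_unique_urls_py split_unique_urls_py_alt
  by_cases h : pvFirstLoopA PySem.Set.empty items = false
  · rw [if_pos h, pvChunksB]
    have hs : pvScanB PySem.Set.empty items = items.length :=
      pvFirstLoopA_scan items _ h
    simp only [PySem.Set.empty] at hs ⊢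
    simp [hs]
  · rw [if_neg h]
    cases items with
    | nil => simp [pvFirstLoopA] at h
    | cons x xs =>
        obtain ⟨idx, rec⟩ := x
        have hc : pvUrl rec ∉ (PySem.Set.empty : PySem.Set String) := by
          simp [PySem.Set.empty]
        simp only [pvLoopA, pvContains_true, List.nil_append]
        rw [if_neg hc, pvLoopA_eq_gchunks _ _ _ _ (by simp), pvGchunks_eq]
        conv_rhs => rw [pvChunksB]
        simp only [pvScanB, pvContains_true, List.nil_append]
        rw [if_neg hc]
        have hcomm : 1 + pvScanB (PySem.Set.add PySem.Set.empty (pvUrl rec)) xs =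
            pvScanB (PySem.Set.add PySem.Set.empty (pvUrl rec)) xs + 1 :=
          Nat.add_comm _ _
        rw [hcomm]
        simp only [List.take_succ_cons, List.drop_succ_cons]
        split_ifs with h2
        · simp
        · rw [pvChunksB_acc _ _ rfl
            ([(idx, rec) :: List.take (pvScanB (PySem.Set.add PySem.Set.empty (pvUrl rec)) xs) xs])]
          simp only [List.cons_append, List.nil_append]
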